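-- pv_equiv track=rewrite | github.com/hamcheesess/2023_TGwinG_FE_jeongmin | tgwing 4주차 과제.py | beerRefrigerator
-- ===== SOURCE A (Python) =====
-- def beerRefrigerator(x):
--     a = []
--
--     for i in range(1, x):
--         if x%i == 0:
--             for j in range(1, x):
--                 if (x//i)%j == 0:
--                     a.append((i, j, x//i//j))
--
--     y = int(a[0][0]*a[0][1] + a[0][2]*a[0][1]+ a[0][0]*a[0][2])
--     l = 0
--     for k in range(1, len(a)):
--         t = int(a[k][0]*a[k][1] + a[k][2]*a[k][1]+ a[k][0]*a[k][2])
--         if y > t: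
--             y = t
--             l = k
--     return f'{a[l][0]} x {a[l][1]} x {a[l][2]}'
-- ===== SOURCE B (Python) =====
-- def beerRefrigerator(x):
--     # Divisor-pair enumeration: list each number's divisors once via a sqrt scan
--     # instead of scanning all of range(1, x) twice; first minimal-sum triple wins.
--     def divisors(n):
--         small, large = [], []
--         d = 1
--         while d * d <= n:
--             if n % d == 0:
--                 small.append(d)
--                 q = n // d
--                 if q != d:
--                     large.append(q)
--             d += 1
--         large.reverse()
--         return small + large
--
--     best = None
--     for i in divisors(x):
--         m = x // i
--         for j in divisors(m):
--             k = m // j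
--             s = i * j + j * k + i * k
--             if best is None or s < best[0]:
--                 best = (s, i, j, k)
--     return f'{best[1]} x {best[2]} x {best[3]}'
-- ===== Notes on version B (the rewrite author's own statement) =====
-- stated objective: faster
-- what changed: B enumerates each number's divisors once with a sqrt-bounded scan (small divisors plus their reversed cofactors) and keeps the first minimal-sum triple in a single running fold, instead of A's two full range(1,x) scans per level and a separate index-tracking minimum pass over the stored list.
-- crash fix: On x = 1 A raises IndexError (its divisor list is empty because range(1,1) is empty); B returns '1 x 1 x 1', the only factorization of 1. — e.g. on beerRefrigerator(1): A raises IndexError, B returns "1 x 1 x 1"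
import Mathlib
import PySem

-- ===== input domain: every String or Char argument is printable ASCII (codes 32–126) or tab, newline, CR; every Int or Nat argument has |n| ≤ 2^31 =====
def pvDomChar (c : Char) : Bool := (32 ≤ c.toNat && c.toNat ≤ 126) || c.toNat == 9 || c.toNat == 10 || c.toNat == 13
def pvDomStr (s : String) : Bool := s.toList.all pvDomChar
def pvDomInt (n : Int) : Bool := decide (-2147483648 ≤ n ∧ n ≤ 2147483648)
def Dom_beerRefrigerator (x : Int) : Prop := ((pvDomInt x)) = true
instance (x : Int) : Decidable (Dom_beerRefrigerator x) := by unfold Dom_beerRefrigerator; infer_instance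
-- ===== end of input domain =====

-- B replaces A's quadratic double range(1,x) scan by sqrt-bounded divisor enumeration
-- and a single running minimum (objective: faster, asymptotic).

-- ===== PORT A =====
def beerRefrigerator (x : Int) : String :=
  let a : List (Int × Int × Int) :=
    (PySem.List.pyRange 1 x 1).foldl (fun acc i =>
      if PySem.Int.mod x i = 0 then
        (PySem.List.pyRange 1 x 1).foldl (fun acc2 j =>
          if PySem.Int.mod (PySem.Int.floordiv x i) j = 0 then
            acc2 ++ [(i, j, PySem.Int.floordiv (PySem.Int.floordiv x i) j)]
          else acc2) acc
      else acc) []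
  match PySem.List.pyGet? a 0 with
  | none => ""  -- Python raises IndexError here (a = [], i.e. x ≤ 1); excluded by Pre_
  | some a0 =>
    let y := a0.1 * a0.2.1 + a0.2.2 * a0.2.1 + a0.1 * a0.2.2
    let yl := (PySem.List.pyRange 1 (a.length : Int) 1).foldl
      (fun (st : Int × Int) k =>
        let ak := PySem.List.pyGetD a k (0, 0, 0)
        let t := ak.1 * ak.2.1 + ak.2.2 * ak.2.1 + ak.1 * ak.2.2
        if st.1 > t then (t, k) else st) (y, 0)
    let al := PySem.List.pyGetD a yl.2 (0, 0, 0)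
    PySem.Int.toStr al.1 ++ " x " ++ PySem.Int.toStr al.2.1 ++ " x " ++ PySem.Int.toStr al.2.2

-- ===== PORT B =====
-- while d*d <= n loop of B's divisors(): collects small divisors and their cofactors
def pvDivAux (n d : Int) (small large : List Int) : List Int × List Int :=
  if h : d * d ≤ n then
    if PySem.Int.mod n d = 0 then
      let q := PySem.Int.floordiv n d
      pvDivAux n (d + 1) (small ++ [d]) (if q ≠ d then large ++ [q] else large)
    else pvDivAux n (d + 1) small large
  else (small, large)
termination_by (n + 1 - d).toNat
decreasing_by
  all_goals
    have hd : d ≤ n := by by_cases h0 : 0 < d <;> nlinarith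
    omega

def pvDivisors (n : Int) : List Int :=
  let sl := pvDivAux n 1 [] []
  sl.1 ++ sl.2.reverse

def beerRefrigerator_alt (x : Int) : String :=
  let best : Option (Int × Int × Int × Int) :=
    (pvDivisors x).foldl (fun b i =>
      let m := PySem.Int.floordiv x i
      (pvDivisors m).foldl (fun b2 j =>
        let k := PySem.Int.floordiv m j
        let s := i * j + j * k + i * k
        match b2 with
        | none => some (s, i, j, k)
        | some u => if s < u.1 then some (s, i, j, k) else some u) b) none
  match best with
  | none => ""  -- Python raises TypeError here (best is None, i.e. x ≤ 0); excluded by Pre_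
  | some u =>
    PySem.Int.toStr u.2.1 ++ " x " ++ PySem.Int.toStr u.2.2.1 ++ " x " ++ PySem.Int.toStr u.2.2.2

-- ===== PRECONDITION & SPEC =====
-- Pre_: x ≥ 2. For x ≤ 1 A's triple list is empty and a[0] raises IndexError.
def Pre_beerRefrigerator (x : Int) : Prop := 2 ≤ x
instance (x : Int) : Decidable (Pre_beerRefrigerator x) := by unfold Pre_beerRefrigerator; infer_instance
def pvWitness_beerRefrigerator : Int := 12

-- On x = 1 A raises IndexError (range(1,1) is empty, so its list a is empty); B returns '1 x 1 x 1'.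
def Raises_beerRefrigerator (x : Int) : Prop := x = 1
instance (x : Int) : Decidable (Raises_beerRefrigerator x) := by unfold Raises_beerRefrigerator; infer_instance
def pvRaiseWitness_beerRefrigerator : Int := 1
def pvRaiseWitnessOut_beerRefrigerator : String := "1 x 1 x 1"

def Spec_beerRefrigerator (x : Int) (out : String) : Prop := out = beerRefrigerator_alt x
instance (x : Int) (out : String) : Decidable (Spec_beerRefrigerator x out) := by unfold Spec_beerRefrigerator; infer_instance

-- ===== CLAIM (what is proved, stated in full; the proofs are below) =====
def Claim_equal_beerRefrigerator : Prop := ∀ (x : Int), Dom_beerRefrigerator x → Pre_beerRefrigerator x → Spec_beerRefrigerator x (beerRefrigerator x)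
def Claim_raises_beerRefrigerator : Prop := (∀ (x : Int), Dom_beerRefrigerator x → Raises_beerRefrigerator x → ¬ Pre_beerRefrigerator x) ∧ (Dom_beerRefrigerator (pvRaiseWitness_beerRefrigerator) ∧ Raises_beerRefrigerator (pvRaiseWitness_beerRefrigerator) ∧ beerRefrigerator_alt (pvRaiseWitness_beerRefrigerator) = pvRaiseWitnessOut_beerRefrigerator)

-- ===== LEMMAS AND PROOFS =====

-- ---- proof-side vocabulary ----
def pvSum (t : Int × Int × Int) : Int := t.1 * t.2.1 + t.2.1 * t.2.2 + t.1 * t.2.2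
-- A writes the same surface sum with the middle product commuted
def pvSumA (t : Int × Int × Int) : Int := t.1 * t.2.1 + t.2.2 * t.2.1 + t.1 * t.2.2
def pvStep (b : Option (Int × Int × Int × Int)) (t : Int × Int × Int) : Option (Int × Int × Int × Int) :=
  match b with
  | none => some (pvSum t, t)
  | some u => if pvSum t < u.1 then some (pvSum t, t) else some u
def pvTri (x i j : Int) : Int × Int × Int := (i, j, PySem.Int.floordiv (PySem.Int.floordiv x i) j)
def pvF (n : Int) : List Int := (PySem.List.pyRange 1 (n + 1) 1).filter (fun d => decide (PySem.Int.mod n d = 0))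
def pvFx (x : Int) : List Int := (PySem.List.pyRange 1 x 1).filter (fun i => decide (PySem.Int.mod x i = 0))
def pvG (x m : Int) : List Int := (PySem.List.pyRange 1 x 1).filter (fun j => decide (PySem.Int.mod m j = 0))
def pvLa (x : Int) : List (Int × Int × Int) := (pvFx x).flatMap (fun i => (pvG x (PySem.Int.floordiv x i)).map (pvTri x i))
def pvLb (x : Int) : List (Int × Int × Int) := (pvDivisors x).flatMap (fun i => (pvDivisors (PySem.Int.floordiv x i)).map (pvTri x i))
-- the small-divisor scan of pvDivAux without its accumulators
def pvSmalls (n d : Int) : List Int :=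
  if _h : d * d ≤ n then
    (if PySem.Int.mod n d = 0 then [d] else []) ++ pvSmalls n (d + 1)
  else []
termination_by (n + 1 - d).toNat
decreasing_by
  all_goals
    have hd : d ≤ n := by by_cases h0 : 0 < d <;> nlinarith
    omega

theorem pvSumA_eq (t : Int × Int × Int) : pvSumA t = pvSum t := by
  unfold pvSumA pvSum; ring

theorem pvDivisors_one : pvDivisors 1 = [1] := by
  have h2 : pvDivAux 1 2 [1] [] = ([1], []) := by rw [pvDivAux]; norm_num
  have h1 : pvDivAux 1 1 [] [] = ([1], []) := by
    rw [pvDivAux]; norm_num [PySem.Int.mod, PySem.Int.floordiv, h2]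
  simp [pvDivisors, h1]

-- ---- divisor enumeration: pvDivisors n is the ascending divisor list ----
theorem pvDivAux_eq (n d : Int) (small large : List Int) :
    pvDivAux n d small large =
      (small ++ pvSmalls n d,
       large ++ ((pvSmalls n d).filter (fun e => decide (PySem.Int.floordiv n e ≠ e))).map
         (fun e => PySem.Int.floordiv n e)) := by
  fun_induction pvDivAux n d small large with
  | case1 d small large hle hmod q ih =>
    rw [pvSmalls, dif_pos hle, if_pos hmod]
    by_cases hq : q ≠ d
    · simp only [dif_pos hq] at ih
      rw [if_pos hq, ih]
      simp only [List.filter_cons, List.append_assoc, List.cons_append, List.nil_append,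
        Prod.mk.injEq]
      refine ⟨trivial, ?_⟩
      rw [if_pos (show decide (PySem.Int.floordiv n d ≠ d) = true by simpa using hq)]
      simp only [List.map_cons]
      rfl
    · simp only [dif_neg hq] at ih
      rw [if_neg hq, ih]
      simp only [ne_eq, Decidable.not_not] at hq
      simp only [List.filter_cons, List.append_assoc, List.cons_append, List.nil_append,
        Prod.mk.injEq]
      refine ⟨trivial, ?_⟩
      rw [if_neg (show ¬ decide (PySem.Int.floordiv n d ≠ d) = true by simpa using hq)]
  | case2 d small large hle hmod ih =>
    rw [pvSmalls, dif_pos hle, if_neg hmod, ih]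
    simp
  | case3 d small large hle =>
    rw [pvSmalls, dif_neg hle]
    simp

theorem mem_pvSmalls_of {n d e : Int} (h : e ∈ pvSmalls n d) :
    d ≤ e ∧ e * e ≤ n ∧ PySem.Int.mod n e = 0 := by
  fun_induction pvSmalls n d with
  | case1 d hle ih =>
    rcases List.mem_append.mp h with h1 | h1
    · by_cases hmod : PySem.Int.mod n d = 0 <;> simp [hmod] at h1
      subst h1; exact ⟨le_refl _, hle, hmod⟩
    · have := ih h1; exact ⟨by omega, this.2.1, this.2.2⟩
  | case2 d hle => simp at h

theorem pvSmalls_mem {n d e : Int} (hd : 1 ≤ d) (h1 : d ≤ e) (h2 : e * e ≤ n)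
    (h3 : PySem.Int.mod n e = 0) : e ∈ pvSmalls n d := by
  fun_induction pvSmalls n d with
  | case1 d hle ih =>
    by_cases he : e = d
    · subst he; simp [h3]
    · exact List.mem_append_right _ (ih (by omega) (by omega))
  | case2 d hle =>
    exfalso
    have : d * d ≤ e * e := by nlinarith
    omega

theorem pvSmalls_pairwise (n d : Int) : (pvSmalls n d).Pairwise (· < ·) := by
  fun_induction pvSmalls n d with
  | case1 d hle ih =>
    apply List.pairwise_append.mpr
    refine ⟨?_, ih, ?_⟩
    · by_cases hmod : PySem.Int.mod n d = 0 <;> simp [hmod]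
    · intro a ha b hb
      have := mem_pvSmalls_of hb
      by_cases hmod : PySem.Int.mod n d = 0 <;> simp [hmod] at ha
      omega
  | case2 d hle => simp

theorem pvCofactor {n e : Int} (hn : 1 ≤ n) (he : 1 ≤ e) (hd : e ∣ n) :
    PySem.Int.floordiv n e * e = n ∧ 1 ≤ PySem.Int.floordiv n e ∧
      PySem.Int.floordiv n e ∣ n ∧ PySem.Int.floordiv n e ≤ n := by
  have hfd : PySem.Int.floordiv n e = n / e := PySem.Int.floordiv_eq_ediv_of_pos (by omega)
  have hme : n / e * e = n := Int.ediv_mul_cancel hd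
  have h1 : 1 ≤ n / e := by nlinarith
  have hdv : n / e ∣ n := ⟨e, hme.symm⟩
  have hle : n / e ≤ n := Int.le_of_dvd (by omega) hdv
  rw [hfd]
  exact ⟨hme, h1, hdv, hle⟩

theorem mem_pvDivisors {n e : Int} (hn : 1 ≤ n) :
    e ∈ pvDivisors n ↔ 1 ≤ e ∧ e ≤ n ∧ e ∣ n := by
  have hdef : pvDivisors n = pvSmalls n 1 ++
      (((pvSmalls n 1).filter (fun e => decide (PySem.Int.floordiv n e ≠ e))).map
        (fun e => PySem.Int.floordiv n e)).reverse := by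
    unfold pvDivisors
    rw [pvDivAux_eq]
    simp
  rw [hdef]
  constructor
  · intro h
    rcases List.mem_append.mp h with h1 | h1
    · obtain ⟨ha, hb, hc⟩ := mem_pvSmalls_of h1
      have hdvd : e ∣ n := (PySem.Int.mod_eq_zero_iff_dvd n e).mp hc
      exact ⟨by omega, by nlinarith, hdvd⟩
    · rw [List.mem_reverse] at h1
      obtain ⟨w, hw, hwe⟩ := List.mem_map.mp h1
      obtain ⟨hwS, _⟩ := List.mem_filter.mp hw
      obtain ⟨ha, hb, hc⟩ := mem_pvSmalls_of hwS
      have hdvd : w ∣ n := (PySem.Int.mod_eq_zero_iff_dvd n w).mp hc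
      obtain ⟨q1, q2, q3, q4⟩ := pvCofactor hn (by omega) hdvd
      rw [← hwe]
      exact ⟨q2, q4, q3⟩
  · rintro ⟨h1, h2, h3⟩
    by_cases hsq : e * e ≤ n
    · exact List.mem_append_left _
        (pvSmalls_mem le_rfl h1 hsq ((PySem.Int.mod_eq_zero_iff_dvd n e).mpr h3))
    · apply List.mem_append_right
      rw [List.mem_reverse]
      obtain ⟨q1, q2, q3, q4⟩ := pvCofactor hn h1 h3
      set q := PySem.Int.floordiv n e with hq
      have hqe : q < e := by nlinarith
      have hqq : q * q < n := by nlinarith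
      have hqS : q ∈ pvSmalls n 1 :=
        pvSmalls_mem le_rfl q2 (by omega) ((PySem.Int.mod_eq_zero_iff_dvd n q).mpr q3)
      have hfq : PySem.Int.floordiv n q = e := by
        rw [PySem.Int.floordiv_eq_ediv_of_pos (by omega)]
        have heq : e * q = n := by nlinarith
        rw [← heq]
        exact Int.mul_ediv_cancel e (by omega)
      refine List.mem_map.mpr ⟨q, List.mem_filter.mpr ⟨hqS, by simp [hfq]; omega⟩, hfq⟩

theorem pvDivisors_pairwise {n : Int} (hn : 1 ≤ n) : (pvDivisors n).Pairwise (· < ·) := by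
  have hdef : pvDivisors n = pvSmalls n 1 ++
      (((pvSmalls n 1).filter (fun e => decide (PySem.Int.floordiv n e ≠ e))).map
        (fun e => PySem.Int.floordiv n e)).reverse := by
    unfold pvDivisors
    rw [pvDivAux_eq]
    simp
  have hsm : ∀ {e : Int}, e ∈ pvSmalls n 1 →
      1 ≤ e ∧ e * e ≤ n ∧ e ∣ n ∧ PySem.Int.floordiv n e * e = n ∧
        1 ≤ PySem.Int.floordiv n e := by
    intro e he
    obtain ⟨ha, hb, hc⟩ := mem_pvSmalls_of he
    have hdvd : e ∣ n := (PySem.Int.mod_eq_zero_iff_dvd n e).mp hc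
    obtain ⟨q1, q2, _, _⟩ := pvCofactor hn (by omega) hdvd
    exact ⟨by omega, hb, hdvd, q1, q2⟩
  rw [hdef]
  apply List.pairwise_append.mpr
  refine ⟨pvSmalls_pairwise n 1, ?_, ?_⟩
  · rw [List.pairwise_reverse]
    rw [List.pairwise_map]
    have hp : ((pvSmalls n 1).filter (fun e => decide (PySem.Int.floordiv n e ≠ e))).Pairwise (· < ·) :=
      List.Pairwise.sublist List.filter_sublist (pvSmalls_pairwise n 1)
    refine List.Pairwise.imp_of_mem ?_ hp
    intro a b ha hb hab
    have ha' := hsm (List.mem_of_mem_filter ha)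
    have hb' := hsm (List.mem_of_mem_filter hb)
    obtain ⟨a1, a2, _, a4, a5⟩ := ha'
    obtain ⟨b1, b2, _, b4, b5⟩ := hb'
    by_contra hcon
    rw [not_lt] at hcon
    nlinarith
  · intro a ha b hb
    rw [List.mem_reverse] at hb
    obtain ⟨w, hw, hwe⟩ := List.mem_map.mp hb
    have hane := List.mem_filter.mp hw
    obtain ⟨w1, w2, w3, w4, w5⟩ := hsm hane.1
    obtain ⟨a1, a2, _, _, _⟩ := hsm ha
    have hne : PySem.Int.floordiv n w ≠ w := by simpa using hane.2
    have hwsq : w * w < n := by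
      rcases lt_or_eq_of_le w2 with h | h
      · exact h
      · exfalso
        apply hne
        nlinarith
    have hwb : w < PySem.Int.floordiv n w := by nlinarith
    rw [← hwe]
    nlinarith

theorem mem_pvF {n e : Int} : e ∈ pvF n ↔ 1 ≤ e ∧ e ≤ n ∧ e ∣ n := by
  unfold pvF
  rw [List.mem_filter]
  rw [PySem.List.mem_pyRange_one]
  constructor
  · rintro ⟨⟨h1, h2⟩, h3⟩
    exact ⟨h1, by omega, (PySem.Int.mod_eq_zero_iff_dvd n e).mp (by simpa using h3)⟩
  · rintro ⟨h1, h2, h3⟩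
    exact ⟨⟨h1, by omega⟩, by simpa using (PySem.Int.mod_eq_zero_iff_dvd n e).mpr h3⟩

theorem pvF_pairwise (n : Int) : (pvF n).Pairwise (· < ·) :=
  List.Pairwise.sublist List.filter_sublist (PySem.List.pairwise_lt_pyRange_one 1 (n + 1))

theorem pvDivisors_eq (n : Int) (hn : 1 ≤ n) : pvDivisors n = pvF n := by
  refine List.Perm.eq_of_pairwise (fun a b _ _ h1 h2 => absurd (lt_trans h1 h2) (lt_irrefl a))
    (pvDivisors_pairwise hn) (pvF_pairwise n) ?_
  refine (List.perm_ext_iff_of_nodup ?_ ?_).mpr ?_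
  · exact (pvDivisors_pairwise hn).imp (fun h => ne_of_lt h)
  · exact (pvF_pairwise n).imp (fun h => ne_of_lt h)
  · intro a
    rw [mem_pvDivisors hn, mem_pvF]

-- ---- shape of the two triple streams ----
theorem pvFloordiv_one (x : Int) : PySem.Int.floordiv x 1 = x := by
  rw [PySem.Int.floordiv_eq_ediv_of_pos (by omega)]
  exact Int.ediv_one x

theorem pvFloordiv_self {x : Int} (hx : 1 ≤ x) : PySem.Int.floordiv x x = 1 := by
  rw [PySem.Int.floordiv_eq_ediv_of_pos (by omega)]
  exact Int.ediv_self (by omega)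

theorem pvTri_one_one {x : Int} : pvTri x 1 1 = (1, 1, x) := by
  simp [pvTri]

theorem pvF_split {x : Int} (hx : 2 ≤ x) : pvF x = pvFx x ++ [x] := by
  unfold pvF pvFx
  rw [PySem.List.pyRange_one_succ_right (by omega), List.filter_append]
  congr 1
  simp
  exact (PySem.Int.mod_eq_zero_iff_dvd x x).mpr dvd_rfl

theorem pvFx_cons {x : Int} (hx : 2 ≤ x) :
    pvFx x = 1 :: (PySem.List.pyRange 2 x 1).filter (fun i => decide (PySem.Int.mod x i = 0)) := by
  unfold pvFx
  rw [PySem.List.pyRange_one_cons (by omega), List.filter_cons]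
  simp

theorem pvG_eq {x m : Int} (h1 : 1 ≤ m) (h2 : m < x) : pvG x m = pvF m := by
  unfold pvG pvF
  rw [PySem.List.pyRange_one_append 1 (m + 1) x (by omega) (by omega), List.filter_append]
  have hnil : (PySem.List.pyRange (m + 1) x 1).filter (fun j => decide (PySem.Int.mod m j = 0)) = [] := by
    rw [List.filter_eq_nil_iff]
    intro a ha
    rw [PySem.List.mem_pyRange_one] at ha
    have hm : PySem.Int.mod m a = m := by
      rw [PySem.Int.mod_eq_emod_of_pos (by omega)]
      exact Int.emod_eq_of_lt (by omega) (by omega)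
    simp [hm]
    omega
  rw [hnil, List.append_nil]

theorem pvLa_shape {x : Int} (hx : 2 ≤ x) :
    pvLa x = (pvFx x).map (pvTri x 1) ++
      (((PySem.List.pyRange 2 x 1).filter (fun i => decide (PySem.Int.mod x i = 0))).flatMap
        (fun i => (pvG x (PySem.Int.floordiv x i)).map (pvTri x i))) := by
  conv_lhs => rw [pvLa, pvFx_cons hx]
  rw [List.flatMap_cons]
  congr 1
  rw [pvFloordiv_one]
  rfl

theorem pvLb_shape {x : Int} (hx : 2 ≤ x) :
    pvLb x = ((pvFx x).map (pvTri x 1) ++ [(1, x, 1)]) ++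
      (((PySem.List.pyRange 2 x 1).filter (fun i => decide (PySem.Int.mod x i = 0))).flatMap
        (fun i => (pvG x (PySem.Int.floordiv x i)).map (pvTri x i))) ++ [(x, 1, 1)] := by
  have hx1 : PySem.Int.floordiv x 1 = x := pvFloordiv_one x
  have hxx : PySem.Int.floordiv x x = 1 := pvFloordiv_self (by omega)
  conv_lhs => rw [pvLb, pvDivisors_eq x (by omega), pvF_split hx, pvFx_cons hx]
  rw [List.flatMap_append, List.flatMap_cons, List.flatMap_singleton]
  have hblock1 : (pvDivisors (PySem.Int.floordiv x 1)).map (pvTri x 1) =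
      (pvFx x).map (pvTri x 1) ++ [(1, x, 1)] := by
    rw [hx1, pvDivisors_eq x (by omega), pvF_split hx, List.map_append]
    simp [pvTri, hxx]
  have hblockx : (pvDivisors (PySem.Int.floordiv x x)).map (pvTri x x) = [(x, 1, 1)] := by
    rw [hxx, pvDivisors_one]
    simp [pvTri, hxx]
  have hmid : ((PySem.List.pyRange 2 x 1).filter (fun i => decide (PySem.Int.mod x i = 0))).flatMap
        (fun i => (pvDivisors (PySem.Int.floordiv x i)).map (pvTri x i)) =
      ((PySem.List.pyRange 2 x 1).filter (fun i => decide (PySem.Int.mod x i = 0))).flatMap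
        (fun i => (pvG x (PySem.Int.floordiv x i)).map (pvTri x i)) := by
    apply List.flatMap_congr
    intro i hi
    have hmem := List.mem_filter.mp hi
    rw [PySem.List.mem_pyRange_one] at hmem
    have hdvd : i ∣ x := (PySem.Int.mod_eq_zero_iff_dvd x i).mp (by simpa using hmem.2)
    obtain ⟨q1, q2, q3, q4⟩ := pvCofactor (n := x) (e := i) (by omega) (by omega) hdvd
    have hmlt : PySem.Int.floordiv x i < x := by nlinarith [hmem.1.1]
    rw [pvDivisors_eq _ q2, pvG_eq q2 hmlt]
  rw [hblock1, hblockx, hmid]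

-- ---- first-minimum fold ----
theorem pvStep_skip {u : Int × Int × Int × Int} {e : Int × Int × Int} (h : u.1 ≤ pvSum e) :
    pvStep (some u) e = some u := by
  simp only [pvStep]
  rw [if_neg (by omega)]

theorem pvStep_mono (l : List (Int × Int × Int)) (u : Int × Int × Int × Int) :
    ∃ v, l.foldl pvStep (some u) = some v ∧ v.1 ≤ u.1 := by
  induction l generalizing u with
  | nil => exact ⟨u, rfl, le_refl _⟩
  | cons e t ih =>
    by_cases h : pvSum e < u.1
    · obtain ⟨v, hv, hle⟩ := ih (pvSum e, e)
      exact ⟨v, by simpa [pvStep, h] using hv, by omega⟩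
    · obtain ⟨v, hv, hle⟩ := ih u
      exact ⟨v, by simpa [pvStep, h] using hv, hle⟩

theorem pvFold_lb_eq_la {x : Int} (hx : 2 ≤ x) :
    (pvLb x).foldl pvStep none = (pvLa x).foldl pvStep none := by
  rw [pvLb_shape hx, pvLa_shape hx]
  have hM : (pvFx x).map (pvTri x 1) = (1, 1, x) :: ((PySem.List.pyRange 2 x 1).filter
      (fun i => decide (PySem.Int.mod x i = 0))).map (pvTri x 1) := by
    rw [pvFx_cons hx, List.map_cons, pvTri_one_one]
  rw [hM]
  simp only [List.foldl_append, List.foldl_cons, List.foldl_nil, List.cons_append]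
  have hfirst : pvStep none (1, 1, x) = some (pvSum (1, 1, x), (1, 1, x)) := rfl
  rw [hfirst]
  obtain ⟨v, hv, hvle⟩ := pvStep_mono (((PySem.List.pyRange 2 x 1).filter
      (fun i => decide (PySem.Int.mod x i = 0))).map (pvTri x 1)) (pvSum (1, 1, x), (1, 1, x))
  rw [hv]
  rw [pvStep_skip (show v.1 ≤ pvSum (1, x, 1) by unfold pvSum at hvle ⊢; simp at hvle ⊢; omega)]
  obtain ⟨w, hw, hwle⟩ := pvStep_mono (((PySem.List.pyRange 2 x 1).filter
      (fun i => decide (PySem.Int.mod x i = 0))).flatMap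
        (fun i => (pvG x (PySem.Int.floordiv x i)).map (pvTri x i))) v
  rw [hw]
  rw [pvStep_skip (show w.1 ≤ pvSum (x, 1, 1) by unfold pvSum at hvle ⊢; simp at hvle ⊢; omega)]

-- ---- A's index-tracking minimum pass is the pvStep fold ----
theorem pvPhase2 (rest : List (Int × Int × Int)) :
    ∀ (a : List (Int × Int × Int)) (s y lidx : Int) (t : Int × Int × Int),
    (∀ p ∈ PySem.List.enumerate rest s, PySem.List.pyGetD a p.1 (0, 0, 0) = p.2) →
    PySem.List.pyGetD a lidx (0, 0, 0) = t → y = pvSum t →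
    rest.foldl pvStep (some (y, t)) =
      some (((PySem.List.enumerate rest s).foldl
        (fun (st : Int × Int) p => if st.1 > pvSumA p.2 then (pvSumA p.2, p.1) else st) (y, lidx)).1,
        PySem.List.pyGetD a (((PySem.List.enumerate rest s).foldl
        (fun (st : Int × Int) p => if st.1 > pvSumA p.2 then (pvSumA p.2, p.1) else st) (y, lidx)).2) (0, 0, 0)) := by
  induction rest with
  | nil =>
    intro a s y lidx t henum hget hy
    simp only [PySem.List.enumerate, List.foldl_nil]
    rw [hget]
  | cons e rest ih =>
    intro a s y lidx t henum hget hy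
    have hcons : PySem.List.enumerate (e :: rest) s = (s, e) :: PySem.List.enumerate rest (s + 1) := by
      simp [pysem]
    rw [hcons] at henum ⊢
    have hhead : PySem.List.pyGetD a s (0, 0, 0) = e := henum (s, e) List.mem_cons_self
    have htail : ∀ p ∈ PySem.List.enumerate rest (s + 1), PySem.List.pyGetD a p.1 (0, 0, 0) = p.2 :=
      fun p hp => henum p (List.mem_cons_of_mem _ hp)
    rw [List.foldl_cons, List.foldl_cons]
    by_cases h : pvSum e < y
    · rw [show pvStep (some (y, t)) e = some (pvSum e, e) by simp [pvStep, h]]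
      rw [if_pos (by rw [pvSumA_eq]; omega)]
      have hpair : ((pvSumA ((s, e) : Int × (Int × Int × Int)).2, ((s, e) : Int × (Int × Int × Int)).1) : Int × Int) = (pvSum e, s) := by
        simp [pvSumA_eq]
      rw [hpair]
      exact ih a (s + 1) (pvSum e) s e htail hhead rfl
    · rw [show pvStep (some (y, t)) e = some (y, t) by simp [pvStep, h]]
      rw [if_neg (by rw [pvSumA_eq]; omega)]
      exact ih a (s + 1) y lidx t htail hget hy

theorem pvIndex_enum (l : List (Int × Int × Int)) :
    ∀ (pre : List (Int × Int × Int)) (p : Int × (Int × Int × Int)),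
    p ∈ PySem.List.enumerate l (pre.length : Int) →
    PySem.List.pyGetD (pre ++ l) p.1 (0, 0, 0) = p.2 := by
  induction l with
  | nil =>
    intro pre p hp
    simp [PySem.List.enumerate] at hp
  | cons e t ih =>
    intro pre p hp
    have hcons : PySem.List.enumerate (e :: t) (pre.length : Int) =
        ((pre.length : Int), e) :: PySem.List.enumerate t ((pre.length : Int) + 1) := by
      simp [pysem]
    rw [hcons] at hp
    rcases List.mem_cons.mp hp with rfl | hp
    · rw [PySem.List.pyGetD_natCast]
      simp
    · have hlen : ((pre.length : Int) + 1) = (((pre ++ [e]).length : Nat) : Int) := by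
        simp
      rw [hlen] at hp
      have := ih (pre ++ [e]) p hp
      rwa [List.append_assoc, List.singleton_append] at this

theorem pvAList_eq (x : Int) :
    ((PySem.List.pyRange 1 x 1).foldl (fun acc i =>
      if PySem.Int.mod x i = 0 then
        (PySem.List.pyRange 1 x 1).foldl (fun acc2 j =>
          if PySem.Int.mod (PySem.Int.floordiv x i) j = 0 then
            acc2 ++ [(i, j, PySem.Int.floordiv (PySem.Int.floordiv x i) j)]
          else acc2) acc
      else acc) ([] : List (Int × Int × Int))) = pvLa x := by
  rw [PySem.List.foldl_ite_eq_foldl_filter]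
  rw [PySem.List.foldl_congr_mem _ _
      (fun i acc => i ++ (pvG x (PySem.Int.floordiv x acc)).map (pvTri x acc)) _
      (fun acc i _ => by rw [PySem.List.foldl_append_ite]; rfl)]
  rw [PySem.List.foldl_append_eq_flatMap]
  rfl

theorem pvBest_eq (x : Int) :
    ((pvDivisors x).foldl (fun b i =>
      let m := PySem.Int.floordiv x i
      (pvDivisors m).foldl (fun b2 j =>
        let k := PySem.Int.floordiv m j
        let s := i * j + j * k + i * k
        match b2 with
        | none => some (s, i, j, k)
        | some u => if s < u.1 then some (s, i, j, k) else some u) b)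
      (none : Option (Int × Int × Int × Int))) = (pvLb x).foldl pvStep none := by
  unfold pvLb
  rw [List.flatMap_def, List.foldl_flatten, List.foldl_map]
  apply PySem.List.foldl_congr_mem
  intro acc i _
  rw [List.foldl_map]
  rfl

theorem pvPhase2' (t1 : Int × Int × Int) (L' : List (Int × Int × Int)) :
    (t1 :: L').foldl pvStep none =
    some (((PySem.List.pyRange 1 (((t1 :: L').length : Nat) : Int) 1).foldl
      (fun (st : Int × Int) k =>
        let ak := PySem.List.pyGetD (t1 :: L') k (0, 0, 0)
        let t := ak.1 * ak.2.1 + ak.2.2 * ak.2.1 + ak.1 * ak.2.2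
        if st.1 > t then (t, k) else st)
      (t1.1 * t1.2.1 + t1.2.2 * t1.2.1 + t1.1 * t1.2.2, 0)).1,
      PySem.List.pyGetD (t1 :: L')
        ((PySem.List.pyRange 1 (((t1 :: L').length : Nat) : Int) 1).foldl
      (fun (st : Int × Int) k =>
        let ak := PySem.List.pyGetD (t1 :: L') k (0, 0, 0)
        let t := ak.1 * ak.2.1 + ak.2.2 * ak.2.1 + ak.1 * ak.2.2
        if st.1 > t then (t, k) else st)
      (t1.1 * t1.2.1 + t1.2.2 * t1.2.1 + t1.1 * t1.2.2, 0)).2 (0, 0, 0)) := by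
  have h0 : (0 : Int) < ((t1 :: L').length : Int) := by
    simp
  have hm : (PySem.List.pyRange 1 (((t1 :: L').length : Nat) : Int) 1).map
      (fun k => (k, PySem.List.pyGetD (t1 :: L') k (0, 0, 0))) = PySem.List.enumerate L' 1 := by
    have hme := PySem.List.enumerate_eq_map_pyRange (t1 :: L') (0, 0, 0)
    have hrc : PySem.List.pyRange 0 (PySem.List.len (t1 :: L')) 1 =
        0 :: PySem.List.pyRange 1 (((t1 :: L').length : Nat) : Int) 1 := by
      rw [PySem.List.pyRange_one_cons (by simp)]
      norm_num
    rw [hrc, List.map_cons] at hme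
    have hme2 : PySem.List.enumerate (t1 :: L') 0 = (0, t1) :: PySem.List.enumerate L' 1 := by
      simp [pysem]
    rw [hme2] at hme
    exact (List.cons_eq_cons.mp hme).2.symm
  have hidx : ∀ p ∈ PySem.List.enumerate L' 1,
      PySem.List.pyGetD (t1 :: L') p.1 (0, 0, 0) = p.2 := by
    intro p hp
    have h1 : ((([t1] : List (Int × Int × Int)).length : Nat) : Int) = 1 := by norm_num
    rw [← h1] at hp
    simpa using pvIndex_enum L' [t1] p hp

  have hget0 : PySem.List.pyGetD (t1 :: L') 0 (0, 0, 0) = t1 := by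
    simp [pysem]
  have key := pvPhase2 L' (t1 :: L') 1 (pvSumA t1) 0 t1 hidx hget0 (pvSumA_eq t1)
  have hfold : (PySem.List.pyRange 1 (((t1 :: L').length : Nat) : Int) 1).foldl
      (fun (st : Int × Int) k =>
        let ak := PySem.List.pyGetD (t1 :: L') k (0, 0, 0)
        let t := ak.1 * ak.2.1 + ak.2.2 * ak.2.1 + ak.1 * ak.2.2
        if st.1 > t then (t, k) else st)
      (t1.1 * t1.2.1 + t1.2.2 * t1.2.1 + t1.1 * t1.2.2, 0) =
      (PySem.List.enumerate L' 1).foldl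
        (fun (st : Int × Int) p => if st.1 > pvSumA p.2 then (pvSumA p.2, p.1) else st)
        (pvSumA t1, 0) := by
    rw [← hm, List.foldl_map]
    rfl
  rw [hfold, List.foldl_cons]
  rw [show pvStep none t1 = some (pvSum t1, t1) from rfl, ← pvSumA_eq t1]
  exact key

-- ===== VERDICT (by name: the statement is the Claim_ definition above) =====
theorem beerRefrigerator_spec : Claim_equal_beerRefrigerator := by
  intro x _ hx
  unfold Pre_beerRefrigerator at hx
  unfold Spec_beerRefrigerator
  unfold beerRefrigerator beerRefrigerator_alt
  simp only [pvAList_eq, pvBest_eq, pvFold_lb_eq_la hx]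
  rw [pvLa_shape hx, pvFx_cons hx, List.map_cons, pvTri_one_one, List.cons_append]
  generalize (((PySem.List.pyRange 2 x 1).filter
      (fun i => decide (PySem.Int.mod x i = 0))).map (pvTri x 1) ++
      ((PySem.List.pyRange 2 x 1).filter (fun i => decide (PySem.Int.mod x i = 0))).flatMap
        (fun i => (pvG x (PySem.Int.floordiv x i)).map (pvTri x i))) = L'
  rw [show PySem.List.pyGet? ((1, 1, x) :: L') 0 = some ((1, 1, x) : Int × Int × Int) from by
    simp [pysem]]
  rw [pvPhase2' (1, 1, x) L']

theorem beerRefrigerator_raises : Claim_raises_beerRefrigerator := by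
  unfold Claim_raises_beerRefrigerator
  constructor
  · intro x _ hr
    unfold Raises_beerRefrigerator at hr
    unfold Pre_beerRefrigerator
    omega
  · refine ⟨by decide, rfl, by simp [pvRaiseWitness_beerRefrigerator, pvRaiseWitnessOut_beerRefrigerator, beerRefrigerator_alt, pvDivisors_one]; decide⟩

-- self-check that the crash-fix witness facts proved in beerRefrigerator_raises are available by projection
theorem beerRefrigerator_raises_ok :
    Raises_beerRefrigerator pvRaiseWitness_beerRefrigerator ∧
      beerRefrigerator_alt pvRaiseWitness_beerRefrigerator = pvRaiseWitnessOut_beerRefrigerator :=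
  ⟨beerRefrigerator_raises.2.2.1, beerRefrigerator_raises.2.2.2⟩
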